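-- pv_equiv track=rewrite | github.com/akent4000/Universal-Gate-Compiler | nand_optimizer/synthesis/sat_resub.py | _shrink_template
-- ===== SOURCE A (Python) =====
-- from typing    import Dict, List, Optional, Set, Tuple
--
-- def _shrink_template(
--     tmpl_out: int,
--     ops:      List[Tuple[int, int]],
--     from_k:   int,
--     to_k:     int,
-- ) -> Optional[Tuple[int, List[Tuple[int, int]]]]:
--     """
--     Re-number a 4-input AIG_DB_4 template so its op indices are
--     consistent with a smaller ``to_k``-input ordered cut.
--
--     The AIG_DB_4 convention uses ``2+2*i`` for input i, ``3+2*i`` for ~i,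
--     and ``2+2*from_k + 2*g`` for gate g's output.  When applying against
--     only ``to_k < from_k`` inputs, ``_apply_template`` writes gate outputs
--     starting at ``2+2*to_k``, so the template's gate literals must be
--     shifted down by ``2*(from_k - to_k)``.  If any op references a
--     padding input (index ≥ to_k), the template genuinely uses more than
--     ``to_k`` inputs and cannot be shrunk — returns ``None``.
--     """
--     if to_k >= from_k:
--         return (tmpl_out, ops)
--     delta       = 2 * (from_k - to_k)
--     op_base_old = 2 + 2 * from_k
--     pad_lo      = 2 + 2 * to_k
--     pad_hi      = op_base_old  # padding inputs: pad_lo .. pad_hi-1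
--
--     def remap(lit: int) -> Optional[int]:
--         if lit < 2:                        # constant
--             return lit
--         if lit < pad_lo:                   # real input
--             return lit
--         if lit < pad_hi:                   # padding input — template uses
--             return None                    # an input we don't have
--         return lit - delta                 # gate literal: shift down
--
--     new_ops: List[Tuple[int, int]] = []
--     for a, b in ops:
--         ra = remap(a)
--         rb = remap(b)
--         if ra is None or rb is None:
--             return None
--         new_ops.append((ra, rb))
--     new_out = remap(tmpl_out)
--     if new_out is None:
--         return None
--     return (new_out, new_ops)
-- ===== SOURCE B (Python) =====
-- def _shrink_template(tmpl_out, ops, from_k, to_k):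
--     if to_k >= from_k:
--         return (tmpl_out, ops)
--     delta = 2 * (from_k - to_k)
--     pad_lo = max(2, 2 + 2 * to_k)    # first padding-input literal (constants live below 2)
--     pad_hi = max(2, 2 + 2 * from_k)  # first gate literal
--     # Build the sorted set of distinct literals once; a single binary search
--     # (lower bound of pad_lo) then decides whether any literal falls in the
--     # padding window [pad_lo, pad_hi).
--     lits = sorted({tmpl_out, *(x for pair in ops for x in pair)})
--     lo, hi = 0, len(lits)
--     while lo < hi:
--         mid = (lo + hi) // 2
--         if lits[mid] < pad_lo:
--             lo = mid + 1
--         else: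
--             hi = mid
--     if lo < len(lits) and lits[lo] < pad_hi:
--         return None                  # a padding input is referenced
--     def shift(lit):
--         return lit - delta if lit >= pad_hi else lit
--     return (shift(tmpl_out), [(shift(a), shift(b)) for a, b in ops])
-- ===== Notes on version B (the rewrite author's own statement) =====
-- stated objective: alternative
-- what changed: A remaps every literal in one linear pass with an Optional-returning helper and bails on the first padding hit; B instead builds the sorted set of distinct literals and decides shrinkability with a single hand-written binary search (lower bound of the padding window), then applies the shift as pure arithmetic.
import Mathlib
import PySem

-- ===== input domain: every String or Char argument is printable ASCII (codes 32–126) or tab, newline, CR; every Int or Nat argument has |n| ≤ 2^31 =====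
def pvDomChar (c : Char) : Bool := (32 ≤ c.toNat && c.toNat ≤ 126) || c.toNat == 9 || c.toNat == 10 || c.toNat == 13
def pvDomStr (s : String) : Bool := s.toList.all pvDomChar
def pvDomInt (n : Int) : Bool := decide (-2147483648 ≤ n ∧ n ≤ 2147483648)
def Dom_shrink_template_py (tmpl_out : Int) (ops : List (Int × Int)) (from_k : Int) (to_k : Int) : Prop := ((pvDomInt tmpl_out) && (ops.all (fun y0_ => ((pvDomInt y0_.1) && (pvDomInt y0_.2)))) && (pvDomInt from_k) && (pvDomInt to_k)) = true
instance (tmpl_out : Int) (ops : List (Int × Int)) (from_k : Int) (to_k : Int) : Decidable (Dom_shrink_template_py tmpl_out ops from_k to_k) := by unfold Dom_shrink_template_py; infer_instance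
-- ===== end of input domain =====

-- B replaces A's linear Optional-remap pass by: sorted set of distinct literals +
-- one binary search deciding whether any literal lies in the padding window,
-- then a pure arithmetic shift (objective: alternative).

-- ===== PORT A =====
-- A's local helper `remap`
def pvRemapA (pad_lo pad_hi delta lit : Int) : Option Int :=
  if lit < 2 then some lit
  else if lit < pad_lo then some lit
  else if lit < pad_hi then none
  else some (lit - delta)

-- A's `for a, b in ops` loop with the `new_ops` accumulator and early `return None`
def pvLoopA (pad_lo pad_hi delta : Int) :
    List (Int × Int) → List (Int × Int) → Option (List (Int × Int))
  | [], acc => some acc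
  | (a, b) :: rest, acc =>
    match pvRemapA pad_lo pad_hi delta a, pvRemapA pad_lo pad_hi delta b with
    | some ra, some rb => pvLoopA pad_lo pad_hi delta rest (acc ++ [(ra, rb)])
    | _, _ => none

def shrink_template_py (tmpl_out : Int) (ops : List (Int × Int)) (from_k : Int) (to_k : Int) : Option (Int × (List (Int × Int))) :=
  if to_k ≥ from_k then some (tmpl_out, ops)
  else
    let delta := 2 * (from_k - to_k)
    let op_base_old := 2 + 2 * from_k
    let pad_lo := 2 + 2 * to_k
    let pad_hi := op_base_old
    match pvLoopA pad_lo pad_hi delta ops [] with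
    | none => none
    | some new_ops =>
      match pvRemapA pad_lo pad_hi delta tmpl_out with
      | none => none
      | some new_out => some (new_out, new_ops)

-- ===== PORT B =====
-- B's `shift` helper
def pvShiftB (hi delta lit : Int) : Int := if lit ≥ hi then lit - delta else lit

-- B's hand-written `while lo < hi` lower-bound loop (indices are nonnegative
-- throughout, so Nat; `(lo+hi)/2` on Nat is Python's `//`; `lits[mid]` is in
-- range on every call made by the function, so `getD` is exact there; the
-- fuel argument, called with lits.length ≥ hi - lo, only bounds the loop)
def pvBisectB (lits : List Int) (t : Int) : Nat → Nat → Nat → Nat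
  | 0, lo, _hi => lo
  | fuel + 1, lo, hi =>
    if lo < hi then
      let mid := (lo + hi) / 2
      if lits.getD mid 0 < t then pvBisectB lits t fuel (mid + 1) hi
      else pvBisectB lits t fuel lo mid
    else lo

def shrink_template_py_alt (tmpl_out : Int) (ops : List (Int × Int)) (from_k : Int) (to_k : Int) : Option (Int × (List (Int × Int))) :=
  if to_k ≥ from_k then some (tmpl_out, ops)
  else
    let delta := 2 * (from_k - to_k)
    let pad_lo := max 2 (2 + 2 * to_k)
    let pad_hi := max 2 (2 + 2 * from_k)
    -- sorted({tmpl_out, *(x for pair in ops for x in pair)})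
    let lits := PySem.List.sorted
      (PySem.Set.ofList (tmpl_out :: ops.flatMap (fun p => [p.1, p.2]))) (fun x => x)
    let lo := pvBisectB lits pad_lo lits.length 0 lits.length
    if lo < lits.length ∧ lits.getD lo 0 < pad_hi then none
    else some (pvShiftB pad_hi delta tmpl_out,
               ops.map (fun p => (pvShiftB pad_hi delta p.1, pvShiftB pad_hi delta p.2)))

-- ===== PRECONDITION & SPEC =====
def Spec_shrink_template_py (tmpl_out : Int) (ops : List (Int × Int)) (from_k : Int) (to_k : Int) (out : Option (Int × (List (Int × Int)))) : Prop := out = shrink_template_py_alt tmpl_out ops from_k to_k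
instance (tmpl_out : Int) (ops : List (Int × Int)) (from_k : Int) (to_k : Int) (out : Option (Int × (List (Int × Int)))) : Decidable (Spec_shrink_template_py tmpl_out ops from_k to_k out) := by unfold Spec_shrink_template_py; infer_instance

-- ===== CLAIM (what is proved, stated in full; the proofs are below) =====
def Claim_equal_shrink_template_py : Prop := ∀ (tmpl_out : Int) (ops : List (Int × Int)) (from_k : Int) (to_k : Int), Dom_shrink_template_py tmpl_out ops from_k to_k → Spec_shrink_template_py tmpl_out ops from_k to_k (shrink_template_py tmpl_out ops from_k to_k)

-- ===== LEMMAS AND PROOFS =====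

-- "lit is in the effective padding window"
def pvBad (lo hi lit : Int) : Bool := decide (max 2 lo ≤ lit) && decide (lit < max 2 hi)

-- A's remap, characterised through the window test and B's shift (needs lo < hi)
theorem pvRemapA_eq (lo hi delta lit : Int) (h : lo < hi) :
    pvRemapA lo hi delta lit =
      if pvBad lo hi lit then none else some (pvShiftB (max 2 hi) delta lit) := by
  unfold pvRemapA pvBad pvShiftB
  split_ifs <;> simp_all <;> omega

theorem pvLoopA_eq (lo hi delta : Int) (h : lo < hi) (ops acc : List (Int × Int)) :
    pvLoopA lo hi delta ops acc =
      if ops.any (fun p => pvBad lo hi p.1 || pvBad lo hi p.2) then none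
      else some (acc ++ ops.map (fun p =>
        (pvShiftB (max 2 hi) delta p.1, pvShiftB (max 2 hi) delta p.2))) := by
  induction ops generalizing acc with
  | nil => simp [pvLoopA]
  | cons p rest ih =>
    obtain ⟨a, b⟩ := p
    simp only [pvLoopA, pvRemapA_eq lo hi delta _ h, List.any_cons, List.map_cons]
    by_cases ha : pvBad lo hi a = true
    · simp [ha]
    · by_cases hb : pvBad lo hi b = true
      · simp [ha, hb]
      · have ha' : pvBad lo hi a = false := by simp_all
        have hb' : pvBad lo hi b = false := by simp_all
        simp only [ha', hb', Bool.false_or, Bool.false_eq_true, if_false, ih]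
        simp

theorem pvBad_iff (lo hi lit : Int) :
    pvBad lo hi lit = true ↔ (max 2 lo ≤ lit ∧ lit < max 2 hi) := by
  simp [pvBad]

-- invariant of B's lower-bound loop, by fuel induction on hi - lo
theorem pvBisectB_inv (l : List Int) (t : Int)
    (hmono : ∀ j k : Nat, j ≤ k → k < l.length → l.getD j 0 ≤ l.getD k 0) :
    ∀ (n lo hi : Nat), hi - lo ≤ n → lo ≤ hi → hi ≤ l.length →
    (∀ j, j < lo → l.getD j 0 < t) →
    (∀ j, hi ≤ j → j < l.length → t ≤ l.getD j 0) →
    lo ≤ pvBisectB l t n lo hi ∧ pvBisectB l t n lo hi ≤ hi ∧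
    (∀ j, j < pvBisectB l t n lo hi → l.getD j 0 < t) ∧
    (∀ j, pvBisectB l t n lo hi ≤ j → j < l.length → t ≤ l.getD j 0) := by
  intro n
  induction n with
  | zero =>
    intro lo hi hn hlh hhl hlow hhigh
    refine ⟨le_refl _, hlh, hlow, fun j hj hjl => hhigh j ?_ hjl⟩
    simp only [pvBisectB] at hj
    omega
  | succ n ih =>
    intro lo hi hn hlh hhl hlow hhigh
    by_cases hlt : lo < hi
    · rw [show pvBisectB l t (n + 1) lo hi =
          (if l.getD ((lo + hi) / 2) 0 < t then pvBisectB l t n ((lo + hi) / 2 + 1) hi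
           else pvBisectB l t n lo ((lo + hi) / 2)) from by rw [pvBisectB, if_pos hlt]]
      set mid := (lo + hi) / 2 with hmid
      have hm1 : lo ≤ mid := by omega
      have hm2 : mid < hi := by omega
      by_cases hv : l.getD mid 0 < t
      · rw [if_pos hv]
        have h := ih (mid + 1) hi (by omega) (by omega) hhl
            (fun j hj => lt_of_le_of_lt (hmono j mid (by omega) (by omega)) hv) hhigh
        exact ⟨by have := h.1; omega, h.2.1, h.2.2.1, h.2.2.2⟩
      · rw [if_neg hv]
        have hnew : ∀ j, mid ≤ j → j < l.length → t ≤ l.getD j 0 := fun j hj hjl =>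
          le_trans (le_of_not_gt hv) (hmono mid j hj hjl)
        have h := ih lo mid (by omega) (by omega) (by omega) hlow hnew
        exact ⟨h.1, by omega, h.2.2.1, h.2.2.2⟩
    · rw [pvBisectB, if_neg hlt]
      exact ⟨le_refl _, hlh, hlow, fun j hj hjl => hhigh j (by omega) hjl⟩

-- the binary-search check decides "some element in [t, H)" on a sorted list
theorem pvBisectB_window (l : List Int) (t H : Int)
    (hs : l.Pairwise (· ≤ ·)) :
    ((pvBisectB l t l.length 0 l.length < l.length ∧
        l.getD (pvBisectB l t l.length 0 l.length) 0 < H)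
      ↔ ∃ x ∈ l, t ≤ x ∧ x < H) := by
  have hmono : ∀ j k : Nat, j ≤ k → k < l.length → l.getD j 0 ≤ l.getD k 0 := by
    intro j k hjk hk
    rcases eq_or_lt_of_le hjk with rfl | hlt
    · exact le_refl _
    · have := (List.pairwise_iff_getElem).1 hs j k (by omega) hk hlt
      simpa [List.getD_eq_getElem?_getD, List.getElem?_eq_getElem, (by omega : j < l.length), hk] using this
  obtain ⟨h1, h2, h3, h4⟩ := pvBisectB_inv l t hmono l.length 0 l.length
    (by omega) (by omega) (le_refl _) (by omega) (by intro j hj hjl; omega)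
  set r := pvBisectB l t l.length 0 l.length with hr
  constructor
  · rintro ⟨hrl, hrh⟩
    refine ⟨l.getD r 0, ?_, h4 r (le_refl _) hrl, hrh⟩
    have : l.getD r 0 = l[r] := by
      simp [List.getD_eq_getElem?_getD, hrl]
    rw [this]; exact List.getElem_mem _
  · rintro ⟨x, hx, htx, hxH⟩
    obtain ⟨j, hj, hjx⟩ := List.getElem_of_mem hx
    have hxj : l.getD j 0 = x := by
      simp [List.getD_eq_getElem?_getD, hj, hjx]
    have hrj : r ≤ j := by
      by_contra hc
      exact absurd htx (not_le.2 (by rw [← hxj]; exact h3 j (by omega)))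
    exact ⟨by omega, lt_of_le_of_lt (by rw [← hxj] at hxH; exact hmono r j hrj hj) (hxj ▸ hxH)⟩

-- ===== VERDICT (by name: the statement is the Claim_ definition above) =====
theorem shrink_template_py_spec : Claim_equal_shrink_template_py := by
  intro tmpl_out ops from_k to_k _
  unfold Spec_shrink_template_py shrink_template_py shrink_template_py_alt
  by_cases hk : to_k ≥ from_k
  · simp [hk]
  · have hlt : 2 + 2 * to_k < 2 + 2 * from_k := by omega
    simp only [if_neg hk]
    rw [pvLoopA_eq _ _ _ hlt, pvRemapA_eq _ _ _ _ hlt]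
    set L := max 2 (2 + 2 * to_k) with hL
    set H := max 2 (2 + 2 * from_k) with hH
    set all := tmpl_out :: ops.flatMap (fun p => [p.1, p.2]) with hall
    set lits := PySem.List.sorted (PySem.Set.ofList all) (fun x => x) with hlits
    have hsorted : lits.Pairwise (· ≤ ·) :=
      (PySem.List.sorted_ofList_pairwise_lt all).imp (fun h => le_of_lt h)
    have hmem : ∀ x, x ∈ lits ↔ x ∈ all := by
      intro x
      rw [hlits, PySem.List.mem_sorted, PySem.Set.mem_ofList]
    have hwin := pvBisectB_window lits L H hsorted
    have hbadx : ∀ x : Int, pvBad (2 + 2 * to_k) (2 + 2 * from_k) x = true ↔ (L ≤ x ∧ x < H) :=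
      fun x => by rw [hL, hH]; exact pvBad_iff _ _ _
    have hbad : (∃ x ∈ lits, L ≤ x ∧ x < H) ↔
        (pvBad (2 + 2 * to_k) (2 + 2 * from_k) tmpl_out = true ∨
         ops.any (fun p => pvBad (2 + 2 * to_k) (2 + 2 * from_k) p.1 ||
                           pvBad (2 + 2 * to_k) (2 + 2 * from_k) p.2) = true) := by
      constructor
      · rintro ⟨x, hx, h1, h2⟩
        rw [hmem, hall, List.mem_cons] at hx
        rcases hx with hx | hx
        · left; subst hx; exact (hbadx _).2 ⟨h1, h2⟩
        · right
          rw [List.mem_flatMap] at hx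
          obtain ⟨p, hp, hxl⟩ := hx
          rw [List.any_eq_true]
          refine ⟨p, hp, ?_⟩
          simp only [List.mem_cons] at hxl
          rcases hxl with rfl | hxl
          · exact Bool.or_eq_true_iff.2 (Or.inl ((hbadx p.1).2 ⟨h1, h2⟩))
          · simp only [List.not_mem_nil, or_false] at hxl
            subst hxl
            exact Bool.or_eq_true_iff.2 (Or.inr ((hbadx p.2).2 ⟨h1, h2⟩))
      · rintro (h | h)
        · exact ⟨tmpl_out, (hmem _).2 (by simp [hall]), (hbadx _).1 h⟩
        · rw [List.any_eq_true] at h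
          obtain ⟨p, hp, hb⟩ := h
          rcases Bool.or_eq_true_iff.1 hb with hb | hb
          · refine ⟨p.1, (hmem _).2 ?_, (hbadx _).1 hb⟩
            simp only [hall, List.mem_cons]; right
            exact List.mem_flatMap.2 ⟨p, hp, by simp⟩
          · refine ⟨p.2, (hmem _).2 ?_, (hbadx _).1 hb⟩
            simp only [hall, List.mem_cons]; right
            exact List.mem_flatMap.2 ⟨p, hp, by simp⟩
    by_cases hB : pvBisectB lits L lits.length 0 lits.length < lits.length ∧
        lits.getD (pvBisectB lits L lits.length 0 lits.length) 0 < H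
    · rw [if_pos hB]
      rcases hbad.1 (hwin.1 hB) with h | h
      · cases ops.any (fun p => pvBad (2 + 2 * to_k) (2 + 2 * from_k) p.1 ||
            pvBad (2 + 2 * to_k) (2 + 2 * from_k) p.2)
        · simp [h]
        · simp
      · simp [h]
    · rw [if_neg hB]
      have hnone := (not_iff_not.2 hbad).1 ((not_iff_not.2 hwin).1 hB)
      push Not at hnone
      have h1 : pvBad (2 + 2 * to_k) (2 + 2 * from_k) tmpl_out = false := by
        rcases h : pvBad (2 + 2 * to_k) (2 + 2 * from_k) tmpl_out
        · rfl
        · exact absurd h hnone.1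
      have h2 : ops.any (fun p => pvBad (2 + 2 * to_k) (2 + 2 * from_k) p.1 ||
            pvBad (2 + 2 * to_k) (2 + 2 * from_k) p.2) = false := by
        rcases h : ops.any _
        · rfl
        · exact absurd h hnone.2
      simp [h1, h2, hH]
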